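-- pv_equiv track=rewrite | github.com/nyimbi/Flask-AppBuilder | flask_appbuilder/collaborative/integration/version_control.py | _calculate_commit_statistics
-- ===== SOURCE A (Python) =====
-- from typing import Dict, List, Any, Optional, Set, Union, Tuple
--
-- def _calculate_commit_statistics(
--     changes: List[Dict[str, Any]]
-- ) -> Dict[str, Any]:
--     """Calculate commit statistics"""
--     stats = {
--         "files_changed": len(changes),
--         "lines_added": sum(change.get("lines_added", 0) for change in changes),
--         "lines_deleted": sum(change.get("lines_deleted", 0) for change in changes),
--         "lines_modified": sum(
--             change.get("lines_modified", 0) for change in changes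
--         ),
--     }
--
--     return stats
-- ===== SOURCE B (Python) =====
-- def _calculate_commit_statistics(changes):
--     """Calculate commit statistics by tallying the items of each change
--     into a dict, instead of doing a keyed lookup per statistic."""
--     tally = {"lines_added": 0, "lines_deleted": 0, "lines_modified": 0}
--     for change in changes:
--         for key, value in change.items():
--             if key in tally:
--                 tally[key] += value
--     return {"files_changed": len(changes), **tally}
-- ===== Notes on version B (the rewrite author's own statement) =====
-- stated objective: alternative
-- what changed: B never looks the three statistic keys up in the changes: it flattens each change into its (key, value) items and tallies them into a pre-seeded dict, then splices that tally into the result, instead of A's three keyed sum() scans.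
import Mathlib
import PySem

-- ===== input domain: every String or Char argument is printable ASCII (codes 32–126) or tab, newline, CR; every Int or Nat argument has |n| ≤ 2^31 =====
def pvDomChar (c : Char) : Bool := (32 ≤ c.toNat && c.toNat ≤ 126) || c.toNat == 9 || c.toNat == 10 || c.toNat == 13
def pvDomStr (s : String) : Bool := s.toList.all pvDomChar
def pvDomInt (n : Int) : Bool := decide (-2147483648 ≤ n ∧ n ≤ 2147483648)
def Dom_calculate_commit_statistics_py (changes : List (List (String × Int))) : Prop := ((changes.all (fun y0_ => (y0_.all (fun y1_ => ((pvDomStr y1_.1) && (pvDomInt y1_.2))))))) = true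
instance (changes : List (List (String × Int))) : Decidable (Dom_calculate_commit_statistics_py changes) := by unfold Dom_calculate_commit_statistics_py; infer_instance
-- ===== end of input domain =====

-- B tallies the flattened (key, value) items of every change into a pre-seeded dict
-- instead of A's three keyed sum() scans; same return value on dict-shaped inputs.

-- change.get(key, 0): first match in the association list encoding the dict, else 0
def pvDictGet0 (change : List (String × Int)) (key : String) : Int :=
  ((change.find? (fun p => p.1 == key)).map Prod.snd).getD 0

-- ===== PORT A =====
-- three separate passes, one per key, as in A's three sum(...) comprehensions
def calculate_commit_statistics_py (changes : List (List (String × Int))) : List (String × Int) :=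
  [("files_changed", (changes.length : Int)),
   ("lines_added", (changes.map (fun change => pvDictGet0 change "lines_added")).sum),
   ("lines_deleted", (changes.map (fun change => pvDictGet0 change "lines_deleted")).sum),
   ("lines_modified", (changes.map (fun change => pvDictGet0 change "lines_modified")).sum)]

-- ===== PORT B =====
-- B's nested loop: for change in changes: for (key, value) in change.items():
--   if key in tally: tally[key] += value
def calculate_commit_statistics_py_alt (changes : List (List (String × Int))) : List (String × Int) :=
  let tally0 : PySem.Dict String Int :=
    ((PySem.Dict.empty.insert "lines_added" 0).insert "lines_deleted" 0).insert "lines_modified" 0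
  let tally := changes.foldl
    (fun t change =>
      change.foldl
        (fun (t : PySem.Dict String Int) kv =>
          if t.contains kv.1 then t.insert kv.1 (t.getD kv.1 0 + kv.2) else t)
        t)
    tally0
  -- {"files_changed": len(changes), **tally}
  ("files_changed", (changes.length : Int)) :: tally.items

-- ===== PRECONDITION & SPEC =====
-- Pre_ excludes association lists in which some change carries a duplicate key:
-- such inputs do not encode any Python dict (dict keys are unique), and on them
-- A's first-match lookup and B's item tally are both accidental.
def Pre_calculate_commit_statistics_py (changes : List (List (String × Int))) : Prop :=
  ∀ change ∈ changes, (change.map Prod.fst).Nodup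
instance (changes : List (List (String × Int))) : Decidable (Pre_calculate_commit_statistics_py changes) := by unfold Pre_calculate_commit_statistics_py; infer_instance

def pvWitness_calculate_commit_statistics_py : (List (List (String × Int))) :=
  [[("lines_added", 3), ("lines_deleted", 1)], [("lines_modified", 2), ("other", 7)]]

def Spec_calculate_commit_statistics_py (changes : List (List (String × Int))) (out : List (String × Int)) : Prop := out = calculate_commit_statistics_py_alt changes
instance (changes : List (List (String × Int))) (out : List (String × Int)) : Decidable (Spec_calculate_commit_statistics_py changes out) := by unfold Spec_calculate_commit_statistics_py; infer_instance

-- ===== CLAIM (what is proved, stated in full; the proofs are below) =====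
def Claim_equal_calculate_commit_statistics_py : Prop := ∀ (changes : List (List (String × Int))), Dom_calculate_commit_statistics_py changes → Pre_calculate_commit_statistics_py changes → Spec_calculate_commit_statistics_py changes (calculate_commit_statistics_py changes)

-- ===== LEMMAS AND PROOFS =====

-- the tally dict with the three seeded keys and current values a, d, m
def pvTally (a d m : Int) : PySem.Dict String Int :=
  ((PySem.Dict.empty.insert "lines_added" a).insert "lines_deleted" d).insert "lines_modified" m

lemma pvTally0_eq :
    (((PySem.Dict.empty.insert "lines_added" (0:Int)).insert "lines_deleted" 0).insert "lines_modified" 0)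
      = pvTally 0 0 0 := rfl

-- first-match get on a cons
lemma pvDictGet0_cons (k : String) (v : Int) (rest : List (String × Int)) (t : String) :
    pvDictGet0 ((k, v) :: rest) t = if k = t then v else pvDictGet0 rest t := by
  by_cases h : k = t
  · simp [pvDictGet0, List.find?, h]
  · simp [pvDictGet0, List.find?, beq_eq_false_iff_ne.mpr h, h]

lemma pvDictGet0_of_not_mem (rest : List (String × Int)) (t : String)
    (h : t ∉ rest.map Prod.fst) : pvDictGet0 rest t = 0 := by
  induction rest with
  | nil => rfl
  | cons p ps ih =>
      rw [List.map_cons] at h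
      have h1 : ¬ p.1 = t := fun e => h (by simp [e])
      have h2 : t ∉ ps.map Prod.fst := fun e => h (by simp [e])
      rw [show p = (p.1, p.2) from rfl, pvDictGet0_cons, if_neg h1, ih h2]

-- one inner step on the tally
lemma pvStep (a d m v : Int) (k : String) :
    (if (pvTally a d m).contains k
       then (pvTally a d m).insert k ((pvTally a d m).getD k 0 + v)
       else pvTally a d m)
    = if k = "lines_added" then pvTally (a + v) d m
      else if k = "lines_deleted" then pvTally a (d + v) m
      else if k = "lines_modified" then pvTally a d (m + v)
      else pvTally a d m := by
  by_cases h1 : k = "lines_added"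
  · subst h1; simp [pvTally]; rfl
  · by_cases h2 : k = "lines_deleted"
    · subst h2; simp [pvTally]; rfl
    · by_cases h3 : k = "lines_modified"
      · subst h3; simp [pvTally]; rfl
      · simp [h1, h2, h3, pvTally, PySem.Dict.contains_insert,
              PySem.Dict.contains_empty]

-- the inner loop over one change with distinct keys adds each change.get(key, 0)
lemma pvInner (change : List (String × Int)) (h : (change.map Prod.fst).Nodup) (a d m : Int) :
    change.foldl
      (fun (t : PySem.Dict String Int) kv =>
        if t.contains kv.1 then t.insert kv.1 (t.getD kv.1 0 + kv.2) else t)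
      (pvTally a d m)
    = pvTally (a + pvDictGet0 change "lines_added")
              (d + pvDictGet0 change "lines_deleted")
              (m + pvDictGet0 change "lines_modified") := by
  induction change generalizing a d m with
  | nil => simp [pvDictGet0]
  | cons kv rest ih =>
      obtain ⟨k, v⟩ := kv
      rw [List.map_cons, List.nodup_cons] at h
      rw [List.foldl_cons]
      have hstep := pvStep a d m v k
      dsimp only
      rw [hstep]
      by_cases h1 : k = "lines_added"
      · subst h1
        rw [if_pos rfl, ih h.2, pvDictGet0_of_not_mem rest _ h.1]
        simp [pvDictGet0_cons]
      · by_cases h2 : k = "lines_deleted"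
        · subst h2
          rw [if_neg h1, if_pos rfl, ih h.2, pvDictGet0_of_not_mem rest _ h.1]
          simp [pvDictGet0_cons, h1]
        · by_cases h3 : k = "lines_modified"
          · subst h3
            rw [if_neg h1, if_neg h2, if_pos rfl, ih h.2,
                pvDictGet0_of_not_mem rest _ h.1]
            simp [pvDictGet0_cons, h1, h2]
          · rw [if_neg h1, if_neg h2, if_neg h3, ih h.2]
            simp [pvDictGet0_cons, h1, h2, h3]

-- the outer loop accumulates the three per-key sums
lemma pvOuter (changes : List (List (String × Int)))
    (h : ∀ c ∈ changes, (c.map Prod.fst).Nodup) (a d m : Int) :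
    changes.foldl
      (fun t change =>
        change.foldl
          (fun (t : PySem.Dict String Int) kv =>
            if t.contains kv.1 then t.insert kv.1 (t.getD kv.1 0 + kv.2) else t)
          t)
      (pvTally a d m)
    = pvTally (a + (changes.map (fun c => pvDictGet0 c "lines_added")).sum)
              (d + (changes.map (fun c => pvDictGet0 c "lines_deleted")).sum)
              (m + (changes.map (fun c => pvDictGet0 c "lines_modified")).sum) := by
  induction changes generalizing a d m with
  | nil => simp
  | cons c cs ih =>
      rw [List.foldl_cons, pvInner c (h c (by simp)) a d m,
          ih (fun x hx => h x (by simp [hx]))]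
      simp only [List.map_cons, List.sum_cons, add_assoc]

-- the three seeded items of the tally, in insertion order
lemma pvTally_items (a d m : Int) :
    (pvTally a d m).items
      = [("lines_added", a), ("lines_deleted", d), ("lines_modified", m)] := rfl

-- ===== VERDICT (by name: the statement is the Claim_ definition above) =====
theorem calculate_commit_statistics_py_spec : Claim_equal_calculate_commit_statistics_py := by
  intro changes _ hpre
  show _ = _
  simp only [calculate_commit_statistics_py, calculate_commit_statistics_py_alt]
  rw [pvTally0_eq, pvOuter changes hpre 0 0 0, pvTally_items]
  simp
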